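-- pv_equiv track=rewrite | github.com/ange1inaxu/boolean-sat-solver | boolean_sat_solver.py | get_max_one_session
-- ===== SOURCE A (Python) =====
-- def get_combos(elts, length, prev=[]):
--     '''
--     Return list combos, containing all possible combinations with the given length
--     from the list elts using recursion
--     '''
--     if len(prev) == length:
--         return [prev]
--     else:
--         combos = []
--         for i, val in enumerate(elts):
--             prev_copy = prev.copy()
--             prev_copy.append(val)
--             combos += get_combos(elts[i+1:], length, prev_copy)
--     return combos
--
-- def get_max_one_session(student_preferences, room_capacities):
--     '''
--     Rule 2: Each Student In Exactly One Session
--     Return CNF list of tuples such that a student is in no more than one session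
--     '''
--     students = list(student_preferences.keys())
--     sessions = list(room_capacities.keys())
--
--     sess_combos = get_combos(sessions, 2)
--
--     max_one = []
--     for student in students:
--         for sess_combo in sess_combos:
--             max_one.append([(student+"_"+session, False) for session in sess_combo])
--     return max_one
-- ===== SOURCE B (Python) =====
-- def get_max_one_session(student_preferences, room_capacities):
--     '''
--     Rule 2: Each Student In Exactly One Session
--     Return CNF list of tuples such that a student is in no more than one session
--     '''
--     sessions = list(room_capacities.keys())
--     max_one = []
--     for student in student_preferences.keys():
--         for i, s1 in enumerate(sessions):
--             for s2 in sessions[i+1:]: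
--                 max_one.append([(student + "_" + s1, False), (student + "_" + s2, False)])
--     return max_one
-- ===== Notes on version B (the rewrite author's own statement) =====
-- stated objective: simpler
-- what changed: Replaces the general-length recursive get_combos helper (slicing and copying prefix lists) with direct iterative enumeration of session pairs via a nested loop over each session and its suffix, building each two-literal clause in place.
import Mathlib
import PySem

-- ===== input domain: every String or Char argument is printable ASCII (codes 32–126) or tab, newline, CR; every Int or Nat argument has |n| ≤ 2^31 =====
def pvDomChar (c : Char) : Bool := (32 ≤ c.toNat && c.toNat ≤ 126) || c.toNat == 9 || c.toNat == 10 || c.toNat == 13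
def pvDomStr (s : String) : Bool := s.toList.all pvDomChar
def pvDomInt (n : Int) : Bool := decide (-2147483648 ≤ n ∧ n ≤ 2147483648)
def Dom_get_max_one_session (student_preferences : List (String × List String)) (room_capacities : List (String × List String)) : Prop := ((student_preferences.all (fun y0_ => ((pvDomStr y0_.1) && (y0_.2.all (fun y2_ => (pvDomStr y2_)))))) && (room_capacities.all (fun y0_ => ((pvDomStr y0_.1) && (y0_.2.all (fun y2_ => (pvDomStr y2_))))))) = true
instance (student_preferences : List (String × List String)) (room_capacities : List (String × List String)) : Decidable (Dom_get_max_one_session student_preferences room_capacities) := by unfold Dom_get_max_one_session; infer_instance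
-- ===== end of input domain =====

-- B replaces the recursive combination generator with a direct nested loop over session pairs (simpler).
-- ===== PORT A =====
-- get_combos(elts, 2, prev): the 'for i, val in enumerate(elts)' loop with the slice elts[i+1:] is
-- transcribed as structural recursion over the suffixes of elts; combos += ... is the append.
def get_combos (elts : List String) (length : Nat) (prev : List String) : List (List String) :=
  if prev.length = length then [prev]
  else
    match elts with
    | [] => []
    | v :: rest =>
      -- first loop iteration's recursive call, then the rest of the loop (same prev, shorter elts)
      get_combos rest length (prev ++ [v]) ++ get_combos rest length prev

def get_max_one_session (student_preferences : List (String × List String)) (room_capacities : List (String × List String)) : List (List (String × Bool)) :=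
  let students := PySem.List.dedup (student_preferences.map Prod.fst)
  let sessions := PySem.List.dedup (room_capacities.map Prod.fst)
  let sess_combos := get_combos sessions 2 []
  students.foldl (fun acc student =>
    sess_combos.foldl (fun acc2 sess_combo =>
      acc2 ++ [sess_combo.map (fun session => (student ++ "_" ++ session, false))]) acc) []

-- ===== PORT B =====
-- inner two loops of Source B: for i, s1 in enumerate(sessions): for s2 in sessions[i+1:]: append clause
def altPairs (student : String) : List String → List (List (String × Bool))
  | [] => []
  | s1 :: rest =>
    rest.map (fun s2 => [(student ++ "_" ++ s1, false), (student ++ "_" ++ s2, false)]) ++ altPairs student rest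

def get_max_one_session_alt (student_preferences : List (String × List String)) (room_capacities : List (String × List String)) : List (List (String × Bool)) :=
  let sessions := PySem.List.dedup (room_capacities.map Prod.fst)
  (PySem.List.dedup (student_preferences.map Prod.fst)).foldl
    (fun acc student => acc ++ altPairs student sessions) []

-- ===== PRECONDITION & SPEC =====
def Spec_get_max_one_session (student_preferences : List (String × List String)) (room_capacities : List (String × List String)) (out : List (List (String × Bool))) : Prop := out = get_max_one_session_alt student_preferences room_capacities
instance (student_preferences : List (String × List String)) (room_capacities : List (String × List String)) (out : List (List (String × Bool))) : Decidable (Spec_get_max_one_session student_preferences room_capacities out) := by unfold Spec_get_max_one_session; infer_instance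

-- ===== CLAIM =====
def Claim_equal_get_max_one_session : Prop := ∀ (student_preferences : List (String × List String)) (room_capacities : List (String × List String)), Dom_get_max_one_session student_preferences room_capacities → Spec_get_max_one_session student_preferences room_capacities (get_max_one_session student_preferences room_capacities)

-- ===== LEMMAS AND PROOFS =====
theorem get_combos_done (elts : List String) (n : Nat) (prev : List String)
    (h : prev.length = n) : get_combos elts n prev = [prev] := by
  cases elts <;> rw [get_combos] <;> simp [h]

theorem get_combos_len2_one (elts : List String) (s1 : String) :
    get_combos elts 2 [s1] = elts.map (fun v => [s1, v]) := by
  induction elts with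
  | nil => rw [get_combos]; simp
  | cons v rest ih =>
    rw [get_combos]
    simp [get_combos_done rest 2 [s1, v] (by simp), ih]

theorem altPairs_eq (student : String) (sessions : List String) :
    (get_combos sessions 2 []).map
      (fun c => c.map (fun session => (student ++ "_" ++ session, false)))
      = altPairs student sessions := by
  induction sessions with
  | nil => rw [get_combos]; simp [altPairs]
  | cons v rest ih =>
    rw [get_combos]
    simp only [List.length_nil, OfNat.zero_ne_ofNat, if_false, List.nil_append,
      get_combos_len2_one, List.map_append, List.map_map, altPairs, ih]
    rfl

-- ===== VERDICT =====
theorem get_max_one_session_spec : Claim_equal_get_max_one_session := by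
  intro sp rc _
  unfold Spec_get_max_one_session get_max_one_session get_max_one_session_alt
  simp only [PySem.List.foldl_append_singleton_eq_map]
  have h : (fun (acc : List (List (String × Bool))) (student : String) =>
      acc ++ (get_combos (PySem.List.dedup (rc.map Prod.fst)) 2 []).map
        (fun c => c.map (fun session => (student ++ "_" ++ session, false))))
      = (fun acc student => acc ++ altPairs student (PySem.List.dedup (rc.map Prod.fst))) := by
    funext acc student
    rw [altPairs_eq]
  rw [h]
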